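-- pv_equiv track=rewrite | github.com/MathiasFrost/Codewars | Python/Source/beggars.py | beggars
-- ===== SOURCE A (Python) =====
-- def beggars(values: list[int], n: int):
--     arr: list[int] = []
--     for i in range(0, n):
--         res = 0
--         j = i
--         while j < len(values):
--             res += values[j]
--             j += n
--         arr.append(res)
--     return arr
-- ===== SOURCE B (Python) =====
-- def beggars(values: list[int], n: int):
--     if n <= 0:
--         return []
--     arr = [0] * n
--     for i, v in enumerate(values):
--         arr[i % n] += v
--     return arr
-- ===== Notes on version B (the rewrite author's own statement) =====
-- stated objective: alternative
-- what changed: A makes n strided gather passes over values (one inner while per residue class); B makes a single forward pass with enumerate, distributing each value into arr[i % n], with an early return [] for n <= 0 as A produces.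
import Mathlib
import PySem

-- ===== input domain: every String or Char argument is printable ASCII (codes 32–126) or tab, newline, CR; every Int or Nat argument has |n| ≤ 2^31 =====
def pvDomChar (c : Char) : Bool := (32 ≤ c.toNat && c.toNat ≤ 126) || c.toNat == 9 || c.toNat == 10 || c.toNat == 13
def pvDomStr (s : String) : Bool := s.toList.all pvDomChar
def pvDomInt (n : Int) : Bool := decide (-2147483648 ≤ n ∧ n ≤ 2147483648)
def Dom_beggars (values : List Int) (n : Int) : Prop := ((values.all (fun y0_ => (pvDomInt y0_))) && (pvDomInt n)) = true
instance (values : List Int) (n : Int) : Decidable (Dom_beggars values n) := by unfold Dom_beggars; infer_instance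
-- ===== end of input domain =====

-- B replaces A's n strided gather passes over values by one distributing forward sweep over enumerate(values).


-- ===== PORT A =====
-- inner 'while j < len(values): res += values[j]; j += n'; the '0 < n' conjunct only totalizes the
-- recursion (every call A makes has i ∈ range(0, n), hence 0 < n there); at those calls values[j]
-- is always in range, so pyGetD with default 0 is exact.
def beggarsWhile (values : List Int) (n : Int) (j : Int) (res : Int) : Int :=
  if _h : j < (values.length : Int) ∧ 0 < n then
    beggarsWhile values n (j + n) (res + PySem.List.pyGetD values j 0)
  else res
termination_by ((values.length : Int) - j).toNat
decreasing_by omega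

def beggars (values : List Int) (n : Int) : List Int :=
  (PySem.List.pyRange 0 n 1).foldl (fun arr i => arr ++ [beggarsWhile values n i 0]) []

-- ===== PORT B =====
def beggars_alt (values : List Int) (n : Int) : List Int :=
  if n ≤ 0 then []
  else
    (PySem.List.enumerate values 0).foldl
      (fun arr p =>
        let k := (PySem.Int.mod p.1 n).toNat
        arr.set k (arr.getD k 0 + p.2))
      (List.replicate n.toNat 0)

-- ===== PRECONDITION & SPEC =====
def Spec_beggars (values : List Int) (n : Int) (out : List Int) : Prop := out = beggars_alt values n
instance (values : List Int) (n : Int) (out : List Int) : Decidable (Spec_beggars values n out) := by unfold Spec_beggars; infer_instance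

-- ===== CLAIM (what is proved, stated in full; the proofs are below) =====
def Claim_equal_beggars : Prop := ∀ (values : List Int) (n : Int), Dom_beggars values n → Spec_beggars values n (beggars values n)

-- ===== LEMMAS AND PROOFS =====

-- for 0 ≤ i < n and 0 ≤ L: the arithmetic progression i, i+n, i+2n, … hits L exactly when L % n = i
lemma mod_eq_iff_stride (n L i : Int) (hn : 0 < n) (hL : 0 ≤ L) (h0 : 0 ≤ i) (h1 : i < n) :
    PySem.Int.mod L n = i ↔ (i ≤ L ∧ n ∣ (L - i)) := by
  have hm0 := PySem.Int.mod_nonneg L hn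
  have hm1 := PySem.Int.mod_lt L hn
  have hq := PySem.Int.floordiv_mul_add_mod L n
  set q := PySem.Int.floordiv L n with hqdef
  set m := PySem.Int.mod L n with hmdef
  have hq0 : 0 ≤ q := by nlinarith
  constructor
  · rintro rfl
    refine ⟨by nlinarith, ⟨q, by linarith [mul_comm q n]⟩⟩
  · rintro ⟨hle, ⟨c, hc⟩⟩
    have hdiff : m - i = n * (c - q) := by nlinarith [hq, hc]
    rcases lt_trichotomy (c - q) 0 with h | h | h
    · nlinarith
    · nlinarith
    · nlinarith

-- appending one value v adds it to exactly the one stride sum whose progression hits index len(vs)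
lemma beggarsWhile_append (vs : List Int) (v n : Int) (hn : 0 < n) :
    ∀ j res, 0 ≤ j → beggarsWhile (vs ++ [v]) n j res
      = beggarsWhile vs n j res
        + (if j ≤ (vs.length : Int) ∧ n ∣ ((vs.length : Int) - j) then v else 0) := by
  intro j res
  fun_induction beggarsWhile (vs ++ [v]) n j res with
  | case1 j res h ih =>
    intro hj
    rw [ih (by omega)]
    simp only [List.length_append, List.length_cons, List.length_nil] at h
    rcases lt_or_eq_of_le (by omega : j ≤ (vs.length : Int)) with hlt | heq
    · have hget : PySem.List.pyGetD (vs ++ [v]) j 0 = PySem.List.pyGetD vs j 0 := by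
        rw [PySem.List.pyGetD_eq_getElem _ _ hj (by simp; omega),
            PySem.List.pyGetD_eq_getElem _ _ hj (by omega)]
        exact List.getElem_append_left (by omega)
      rw [hget]
      conv_rhs => rw [beggarsWhile, dif_pos ⟨hlt, hn⟩]
      congr 1
      by_cases hd : n ∣ ((vs.length : Int) - j)
      · have hle : n ≤ (vs.length : Int) - j := Int.le_of_dvd (by omega) hd
        have hd' : n ∣ ((vs.length : Int) - (j + n)) := by
          have := dvd_sub hd (dvd_refl n); simpa [sub_sub] using this
        rw [if_pos ⟨by omega, hd'⟩, if_pos ⟨by omega, hd⟩]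
      · have hd' : ¬ n ∣ ((vs.length : Int) - (j + n)) := by
          intro hc
          apply hd
          have h2 := dvd_add hc (dvd_refl n)
          convert h2 using 1
          ring
        rw [if_neg (by tauto), if_neg (by tauto)]
    · subst heq
      have hget : PySem.List.pyGetD (vs ++ [v]) (vs.length : Int) 0 = v := by
        rw [PySem.List.pyGetD_eq_getElem _ _ (by omega) (by simp)]
        simp
      rw [hget, beggarsWhile, dif_neg (by omega), if_neg (by omega),
          beggarsWhile, dif_neg (by omega), if_pos ⟨le_refl _, by simp⟩]
      ring
  | case2 j res h =>
    intro hj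
    simp only [List.length_append, List.length_cons, List.length_nil] at h
    rw [beggarsWhile, dif_neg (by omega), if_neg (by omega)]
    ring

-- the heart: A's gather map over range(n) equals B's distributing fold, by reverse induction on values
lemma gather_eq_scatter (n : Int) (hn : 0 < n) (values : List Int) :
    (PySem.List.pyRange 0 n 1).map (fun i => beggarsWhile values n i 0)
      = (PySem.List.enumerate values 0).foldl
          (fun arr p =>
            let k := (PySem.Int.mod p.1 n).toNat
            arr.set k (arr.getD k 0 + p.2))
          (List.replicate n.toNat 0) := by
  induction values using List.reverseRecOn with
  | nil =>
      rw [PySem.List.enumerate_nil, List.foldl_nil,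
        List.map_congr_left (fun i hi => by
          rw [beggarsWhile, dif_neg (by
            simp only [PySem.List.mem_pyRange_one] at hi
            simp; omega)])]
      simp [PySem.List.length_pyRange_one]
  | append_singleton vs v ih =>
      have hm0 := PySem.Int.mod_nonneg (vs.length : Int) hn
      have hm1 := PySem.Int.mod_lt (vs.length : Int) hn
      rw [PySem.List.enumerate_append, PySem.List.enumerate_cons, PySem.List.enumerate_nil,
        List.foldl_append, List.foldl_cons, List.foldl_nil, ← ih]
      rw [List.map_congr_left (fun i hi => by
        have hi' : 0 ≤ i ∧ i < n := by simpa [PySem.List.mem_pyRange_one] using hi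
        rw [beggarsWhile_append vs v n hn i 0 hi'.1,
          if_congr (mod_eq_iff_stride n (vs.length : Int) i hn (by positivity) hi'.1 hi'.2).symm
            rfl rfl])]
      apply List.ext_getElem
      · simp [PySem.List.length_pyRange_one]
      · intro p h1 h2
        simp only [List.getElem_map, PySem.List.getElem_pyRange_one, zero_add]
        by_cases hpk : p = (PySem.Int.mod (vs.length : Int) n).toNat
        · subst hpk
          rw [List.getElem_set_self]
          rw [if_pos (by omega), List.getD_eq_getElem _ _ (by
            simpa [PySem.List.length_pyRange_one] using h2 )]
          simp only [List.getElem_map, PySem.List.getElem_pyRange_one, zero_add]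
        · rw [List.getElem_set_ne (by omega)]
          rw [if_neg (by omega)]
          simp

theorem beggars_eq (values : List Int) (n : Int) : beggars values n = beggars_alt values n := by
  by_cases hn : n ≤ 0
  · simp [beggars, beggars_alt, hn, PySem.List.pyRange_one_eq_nil (by omega : n ≤ 0)]
  · rw [beggars, PySem.List.foldl_append_singleton_eq_map, List.nil_append, beggars_alt,
      if_neg hn, gather_eq_scatter n (by omega) values]

-- ===== VERDICT (by name: the statement is the Claim_ definition above) =====
theorem beggars_spec : Claim_equal_beggars := by
  intro values n _
  exact beggars_eq values n
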